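-- pv_equiv track=rewrite | github.com/finani/gdlog_plotly_dash | gdlog_single_plotter.py | data_type_to_length
-- ===== SOURCE A (Python) =====
-- def data_type_to_length(bin_data_type):
--     bin_data_length_from_type = 0
--     for c in bin_data_type:
--         type_length = 0
--         if c == 'd':
--             type_length = 8
--         elif c == 'f':
--             type_length = 4
--         elif c == 'H':
--             type_length = 2
--         elif c == 'B':
--             type_length = 1
--         bin_data_length_from_type = bin_data_length_from_type + type_length
--     return bin_data_length_from_type
-- ===== SOURCE B (Python) =====
-- _SIZES = {'d': 8, 'f': 4, 'H': 2, 'B': 1}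
--
-- def data_type_to_length(bin_data_type):
--     # divide-and-conquer: split the format string in half, table-lookup at leaves
--     n = len(bin_data_type)
--     if n == 0:
--         return 0
--     if n == 1:
--         return _SIZES.get(bin_data_type[0], 0)
--     m = n // 2
--     return data_type_to_length(bin_data_type[:m]) + data_type_to_length(bin_data_type[m:])
-- ===== Notes on version B (the rewrite author's own statement) =====
-- stated objective: alternative
-- what changed: Replaced the single-pass branch-ladder accumulation with a divide-and-conquer recursion that splits the string in half and looks up each character's size in a table at the leaves.
import Mathlib
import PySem

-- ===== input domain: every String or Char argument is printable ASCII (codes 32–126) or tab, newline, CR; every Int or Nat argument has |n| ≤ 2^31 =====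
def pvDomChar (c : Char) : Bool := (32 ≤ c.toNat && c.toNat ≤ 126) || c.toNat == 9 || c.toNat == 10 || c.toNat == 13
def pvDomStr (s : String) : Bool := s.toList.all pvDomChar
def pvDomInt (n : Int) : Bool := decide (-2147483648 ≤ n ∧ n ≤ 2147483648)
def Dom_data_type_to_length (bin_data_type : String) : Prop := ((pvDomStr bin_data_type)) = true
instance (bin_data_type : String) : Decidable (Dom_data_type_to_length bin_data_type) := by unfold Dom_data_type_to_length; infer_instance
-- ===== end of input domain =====

-- B replaces A's single-pass branch-ladder accumulation with a divide-and-conquer recursion over string halves with a table lookup at the leaves (same return value; no side effects).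

-- ===== PORT A =====
def data_type_to_length (bin_data_type : String) : Int :=
  bin_data_type.toList.foldl
    (fun bin_data_length_from_type c =>
      let type_length : Int :=
        if c = 'd' then 8
        else if c = 'f' then 4
        else if c = 'H' then 2
        else if c = 'B' then 1
        else 0
      bin_data_length_from_type + type_length) 0

-- ===== PORT B =====
-- _SIZES = {'d': 8, 'f': 4, 'H': 2, 'B': 1}
def pvSizes : PySem.Dict Char Int :=
  PySem.Dict.mk [('d', 8), ('f', 4), ('H', 2), ('B', 1)]

-- the divide-and-conquer recursion of Source B, over the character list; s[:m]/s[m:] with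
-- 0 ≤ m ≤ n are exactly take/drop, and s[0] on a nonempty string is the head
def pvDtlGo (l : List Char) : Int :=
  if l.length = 0 then 0
  else if l.length = 1 then pvSizes.getD l.headI 0
  else
    let m := l.length / 2
    pvDtlGo (l.take m) + pvDtlGo (l.drop m)
termination_by l.length
decreasing_by
  · simp only [List.length_take]; omega
  · simp only [List.length_drop]; omega

def data_type_to_length_alt (bin_data_type : String) : Int :=
  pvDtlGo bin_data_type.toList

-- ===== PRECONDITION & SPEC =====
def Spec_data_type_to_length (bin_data_type : String) (out : Int) : Prop := out = data_type_to_length_alt bin_data_type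
instance (bin_data_type : String) (out : Int) : Decidable (Spec_data_type_to_length bin_data_type out) := by unfold Spec_data_type_to_length; infer_instance

-- ===== CLAIM (what is proved, stated in full; the proofs are below) =====
def Claim_equal_data_type_to_length : Prop := ∀ (bin_data_type : String), Dom_data_type_to_length bin_data_type → Spec_data_type_to_length bin_data_type (data_type_to_length bin_data_type)

-- ===== LEMMAS AND PROOFS =====

-- the table lookup is the branch ladder, pointwise
theorem pv_getD_eq (c : Char) :
    pvSizes.getD c 0
      = (if c = 'd' then (8 : Int) else if c = 'f' then 4 else if c = 'H' then 2
         else if c = 'B' then 1 else 0) := by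
  simp only [pvSizes, PySem.Dict.getD, PySem.Dict.get?]
  split_ifs with h1 h2 h3 h4
  · subst h1; decide
  · subst h2; decide
  · subst h3; decide
  · subst h4; decide
  · have e1 : ('d' == c) = false := beq_eq_false_iff_ne.mpr (fun h => h1 h.symm)
    have e2 : ('f' == c) = false := beq_eq_false_iff_ne.mpr (fun h => h2 h.symm)
    have e3 : ('H' == c) = false := beq_eq_false_iff_ne.mpr (fun h => h3 h.symm)
    have e4 : ('B' == c) = false := beq_eq_false_iff_ne.mpr (fun h => h4 h.symm)
    simp [List.find?, e1, e2, e3, e4]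

-- B's recursion computes the sum of per-character weights
theorem pv_go_eq (l : List Char) :
    pvDtlGo l = (l.map (fun c => pvSizes.getD c 0)).sum := by
  induction l using pvDtlGo.induct with
  | case1 l h => simp_all [pvDtlGo, List.length_eq_zero_iff.mp h]
  | case2 l h0 h1 =>
    obtain ⟨c, rfl⟩ := List.length_eq_one_iff.mp h1
    simp [pvDtlGo]
  | case3 l h0 h1 m ih1 ih2 =>
    rw [pvDtlGo, if_neg h0, if_neg h1]
    show pvDtlGo (List.take m l) + pvDtlGo (List.drop m l) = _
    rw [ih1, ih2, ← List.sum_append, ← List.map_append, List.take_append_drop]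

-- A's fold computes the same sum, for any starting accumulator
theorem pv_fold_eq (l : List Char) : ∀ (a : Int),
    l.foldl (fun acc c =>
      acc + (if c = 'd' then (8 : Int) else if c = 'f' then 4 else if c = 'H' then 2
             else if c = 'B' then 1 else 0)) a
    = a + (l.map (fun c => pvSizes.getD c 0)).sum := by
  induction l with
  | nil => intro a; simp
  | cons hd t ih =>
    intro a
    simp only [List.foldl_cons, ih, List.map_cons, List.sum_cons, pv_getD_eq]
    ring

-- ===== VERDICT (by name: the statement is the Claim_ definition above) =====
theorem data_type_to_length_spec : Claim_equal_data_type_to_length := by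
  intro s _
  unfold Spec_data_type_to_length data_type_to_length data_type_to_length_alt
  rw [pv_fold_eq, pv_go_eq, zero_add]
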